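-- pv_equiv track=rewrite | github.com/Spring302/TIL_github | python/1.study/1.programmers/p2.py | selectBricks
-- ===== SOURCE A (Python) =====
-- def selectBricks(bricks, toPick):
--     result = []
--     if toPick == 0: return [[]]
--     for i in range(len(bricks)):
--         pick = bricks[i]
--         for rest in selectBricks(bricks[i+2:], toPick-1):
--             result.append([pick]+rest)
--     return result
-- ===== SOURCE B (Python) =====
-- def selectBricks(bricks, toPick):
--     # take-or-skip recursion on the first brick instead of A's loop over every first pick
--     if toPick == 0:
--         return [[]]
--     if not bricks:
--         return []
--     withFirst = [[bricks[0]] + rest for rest in selectBricks(bricks[2:], toPick - 1)]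
--     return withFirst + selectBricks(bricks[1:], toPick)
-- ===== Notes on version B (the rewrite author's own statement) =====
-- stated objective: simpler
-- what changed: Replaces A's loop over every possible first pick (each iteration slicing and recursing) by a binary take-the-first-brick-or-skip-it recursion on the list head; output order is the same lexicographic order.
import Mathlib
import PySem

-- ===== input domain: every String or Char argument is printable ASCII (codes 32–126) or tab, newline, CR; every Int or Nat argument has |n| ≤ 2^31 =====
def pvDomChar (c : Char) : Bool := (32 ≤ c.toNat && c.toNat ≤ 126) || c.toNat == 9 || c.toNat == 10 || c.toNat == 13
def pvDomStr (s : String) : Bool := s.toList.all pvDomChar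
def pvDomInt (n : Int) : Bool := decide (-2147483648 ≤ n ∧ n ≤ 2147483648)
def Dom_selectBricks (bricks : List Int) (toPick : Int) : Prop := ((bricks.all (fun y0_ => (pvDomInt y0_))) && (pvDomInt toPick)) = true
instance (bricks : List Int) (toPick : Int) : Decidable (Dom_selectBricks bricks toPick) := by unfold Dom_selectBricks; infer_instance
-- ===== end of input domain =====

-- B replaces A's loop over every possible first pick by a take-or-skip recursion on the head; simpler, same order.

-- ===== PORT A =====
-- for i in range(len(bricks)): pick = bricks[i]; for rest in selectBricks(bricks[i+2:], toPick-1): result.append([pick]+rest)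
-- bricks[i] with i ∈ range(len(bricks)) is always in range, so getD i 0 is exact.
def selectBricks (bricks : List Int) (toPick : Int) : List (List Int) :=
  if toPick = 0 then [[]]
  else
    (List.range bricks.length).attach.flatMap
      (fun i =>
        (selectBricks (bricks.drop (i.1 + 2)) (toPick - 1)).map
          (fun rest => bricks.getD i.1 0 :: rest))
termination_by bricks.length
decreasing_by
  have := List.mem_range.mp i.2
  simp
  omega

-- ===== PORT B =====
def selectBricks_alt (bricks : List Int) (toPick : Int) : List (List Int) :=
  if toPick = 0 then [[]]
  else
    match bricks with
    | [] => []
    | b :: bs =>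
        ((selectBricks_alt (bs.drop 1) (toPick - 1)).map (fun rest => b :: rest))
          ++ selectBricks_alt bs toPick
termination_by bricks.length
decreasing_by
  · simp
  · simp

-- ===== PRECONDITION & SPEC =====
def Spec_selectBricks (bricks : List Int) (toPick : Int) (out : List (List Int)) : Prop := out = selectBricks_alt bricks toPick
instance (bricks : List Int) (toPick : Int) (out : List (List Int)) : Decidable (Spec_selectBricks bricks toPick out) := by unfold Spec_selectBricks; infer_instance

-- ===== CLAIM (what is proved, stated in full; the proofs are below) =====
def Claim_equal_selectBricks : Prop := ∀ (bricks : List Int) (toPick : Int), Dom_selectBricks bricks toPick → Spec_selectBricks bricks toPick (selectBricks bricks toPick)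

-- ===== LEMMAS AND PROOFS =====

-- flatMap over attach reduces to plain flatMap
theorem pv_flatMap_attach {α β : Type} (l : List α) (f : α → List β) :
    l.attach.flatMap (fun x => f x.1) = l.flatMap f := by
  induction l with
  | nil => simp
  | cons a t ih => simp [List.flatMap_cons, List.attach_cons, List.flatMap_map]

theorem selectBricks_nil (t : Int) :
    selectBricks [] t = if t = 0 then [[]] else [] := by
  rw [selectBricks]
  split <;> simp

-- A with its loop written as a plain flatMap over range
theorem pv_A_unfold (bricks : List Int) (t : Int) (ht : t ≠ 0) :
    selectBricks bricks t =
      (List.range bricks.length).flatMap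
        (fun i => (selectBricks (bricks.drop (i + 2)) (t - 1)).map
          (fun rest => bricks.getD i 0 :: rest)) := by
  rw [selectBricks, if_neg ht]
  exact pv_flatMap_attach (List.range bricks.length)
    (fun i => (selectBricks (bricks.drop (i + 2)) (t - 1)).map
      (fun rest => bricks.getD i 0 :: rest))

-- A's loop on b :: bs splits into the i = 0 iteration and the loop on bs shifted by one.
theorem selectBricks_cons (b : Int) (bs : List Int) (t : Int) (ht : t ≠ 0) :
    selectBricks (b :: bs) t =
      ((selectBricks (bs.drop 1) (t - 1)).map (fun rest => b :: rest))
        ++ selectBricks bs t := by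
  rw [pv_A_unfold _ _ ht, pv_A_unfold bs t ht]
  rw [List.length_cons, List.range_succ_eq_map, List.flatMap_cons, List.flatMap_map]
  congr 1

theorem pv_main (n : Nat) : ∀ (bricks : List Int), bricks.length ≤ n →
    ∀ t, selectBricks bricks t = selectBricks_alt bricks t := by
  induction n with
  | zero =>
      intro bricks h t
      have hb : bricks = [] := List.length_eq_zero_iff.mp (Nat.le_zero.mp h)
      subst hb
      rw [selectBricks_nil, selectBricks_alt]
  | succ n ih =>
      intro bricks h t
      match bricks with
      | [] =>
          rw [selectBricks_nil, selectBricks_alt]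
      | b :: bs =>
          by_cases ht : t = 0
          · subst ht
            rw [selectBricks, selectBricks_alt]
            simp
          · have hbs : bs.length ≤ n := by simpa using Nat.lt_succ_iff.mp (Nat.lt_of_lt_of_le (by simp) (Nat.lt_succ_iff.mp (Nat.lt_succ_of_le h)))
            rw [selectBricks_cons b bs t ht, selectBricks_alt, if_neg ht]
            rw [ih (bs.drop 1) (by simp; omega) (t - 1), ih bs hbs t]

-- ===== VERDICT (by name: the statement is the Claim_ definition above) =====
theorem selectBricks_spec : Claim_equal_selectBricks := by
  intro bricks toPick _
  unfold Spec_selectBricks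
  exact pv_main bricks.length bricks le_rfl toPick
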